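-- pv_equiv track=rewrite | github.com/nielsRocholl/oncology-uls-plus | nnunet_training/scripts/add_singlepass_config.py | product_strides
-- ===== SOURCE A (Python) =====
-- from typing import Dict, List, Tuple
--
-- def product_strides(strides: List[List[int]]) -> Tuple[int, int, int]:
--     dz = dy = dx = 1
--     for s in strides:
--         z, y, x = s
--         dz *= z
--         dy *= y
--         dx *= x
--     return dz, dy, dx
-- ===== SOURCE B (Python) =====
-- def _prod(nums):
--     p = 1
--     for n in nums:
--         p *= n
--     return p
--
-- def product_strides(strides):
--     zs, ys, xs = [], [], []
--     for z, y, x in strides: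
--         zs.append(z)
--         ys.append(y)
--         xs.append(x)
--     return _prod(zs), _prod(ys), _prod(xs)
-- ===== Notes on version B (the rewrite author's own statement) =====
-- stated objective: alternative
-- what changed: B splits the work into two phases: one pass collecting the three axis columns into separate lists, then an independent product reduction per axis, instead of A's single interleaved triple-accumulator pass.
import Mathlib
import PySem

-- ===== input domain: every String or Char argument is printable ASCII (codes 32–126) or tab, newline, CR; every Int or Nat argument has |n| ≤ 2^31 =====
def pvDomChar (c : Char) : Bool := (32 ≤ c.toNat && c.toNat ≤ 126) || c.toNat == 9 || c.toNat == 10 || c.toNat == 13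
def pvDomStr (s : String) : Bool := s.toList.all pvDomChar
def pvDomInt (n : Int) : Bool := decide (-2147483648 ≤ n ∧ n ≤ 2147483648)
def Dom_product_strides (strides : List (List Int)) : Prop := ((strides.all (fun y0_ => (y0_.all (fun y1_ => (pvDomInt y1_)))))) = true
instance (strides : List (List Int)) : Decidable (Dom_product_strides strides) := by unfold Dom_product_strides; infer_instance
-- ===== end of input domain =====

-- B collects the three axis columns in one pass and reduces each column separately,
-- instead of A's single interleaved triple-accumulator pass (objective: alternative decomposition).

-- ===== PORT A =====
-- single pass, triple accumulator (dz, dy, dx); rows of length ≠ 3 raise in Python (excluded by Pre_)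
def product_strides (strides : List (List Int)) : Int × Int × Int :=
  (strides.foldl (fun (acc : Int × Int × Int) s =>
      match s with
      | [z, y, x] => (acc.1 * z, acc.2.1 * y, acc.2.2 * x)
      | _ => acc) (1, 1, 1))

-- ===== PORT B =====
-- unpack a row `z, y, x = s` (Source B's tuple unpacking; non-3 rows raise, excluded by Pre_)
def pvRow3 (s : List Int) : Option (Int × Int × Int) :=
  match s with
  | [] => none
  | z :: r1 =>
    match r1 with
    | [] => none
    | y :: r2 =>
      match r2 with
      | [] => none
      | x :: r3 =>
        match r3 with
        | [] => some (z, y, x)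
        | _ :: _ => none

-- helper _prod from Source B: loop multiplying into p
def pvProdB (nums : List Int) : Int := nums.foldl (fun p n => p * n) 1

-- phase 1: collect columns zs, ys, xs (append per row, as Source B does); phase 2: _prod each
def product_strides_alt (strides : List (List Int)) : Int × Int × Int :=
  let cols := strides.foldl (fun (acc : List Int × List Int × List Int) s =>
      match pvRow3 s with
      | some (z, y, x) => (acc.1 ++ [z], acc.2.1 ++ [y], acc.2.2 ++ [x])
      | none => acc) ([], [], [])
  (pvProdB cols.1, pvProdB cols.2.1, pvProdB cols.2.2)

-- ===== PRECONDITION & SPEC =====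
-- Pre_ excludes rows whose length is not 3: Python's `z, y, x = s` raises ValueError there (in both A and B).
def Pre_product_strides (strides : List (List Int)) : Prop :=
  ∀ s ∈ strides, s.length = 3
instance (strides : List (List Int)) : Decidable (Pre_product_strides strides) := by
  unfold Pre_product_strides; infer_instance

def pvWitness_product_strides : List (List Int) := [[2, 3, 4], [5, 6, 7]]

def Spec_product_strides (strides : List (List Int)) (out : Int × Int × Int) : Prop := out = product_strides_alt strides
instance (strides : List (List Int)) (out : Int × Int × Int) : Decidable (Spec_product_strides strides out) := by unfold Spec_product_strides; infer_instance

-- ===== CLAIM (what is proved, stated in full; the proofs are below) =====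
def Claim_equal_product_strides : Prop := ∀ (strides : List (List Int)), Dom_product_strides strides → Pre_product_strides strides → Spec_product_strides strides (product_strides strides)

-- ===== LEMMAS AND PROOFS =====

theorem pvProdB_snoc (l : List Int) (z : Int) : pvProdB (l ++ [z]) = pvProdB l * z := by
  simp [pvProdB, List.foldl_append]

-- bridge: B's column fold from any accumulator vs A's product fold, for length-3 rows
theorem bridge (strides : List (List Int)) (h : ∀ s ∈ strides, s.length = 3)
    (zs ys xs : List Int) :
    (let cols := strides.foldl (fun (acc : List Int × List Int × List Int) s =>
        match pvRow3 s with
        | some (z, y, x) => (acc.1 ++ [z], acc.2.1 ++ [y], acc.2.2 ++ [x])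
        | none => acc) (zs, ys, xs)
     (pvProdB cols.1, pvProdB cols.2.1, pvProdB cols.2.2)) =
    strides.foldl (fun (acc : Int × Int × Int) s =>
        match s with
        | [z, y, x] => (acc.1 * z, acc.2.1 * y, acc.2.2 * x)
        | _ => acc) (pvProdB zs, pvProdB ys, pvProdB xs) := by
  induction strides generalizing zs ys xs with
  | nil => simp
  | cons s t ih =>
    have hs : s.length = 3 := h s (List.mem_cons_self ..)
    have ht : ∀ u ∈ t, u.length = 3 := fun u hu => h u (List.mem_cons_of_mem _ hu)
    match s, hs with
    | [z, y, x], _ =>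
      simpa [List.foldl_cons, pvRow3, pvProdB_snoc] using ih ht (zs ++ [z]) (ys ++ [y]) (xs ++ [x])

-- ===== VERDICT (by name: the statement is the Claim_ definition above) =====
theorem product_strides_spec : Claim_equal_product_strides := by
  intro strides _ hpre
  unfold Spec_product_strides product_strides product_strides_alt
  simpa [pvProdB] using (bridge strides hpre [] [] []).symm
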